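-- pv_equiv track=rewrite | github.com/Sankalp1729/Assignment | utils/ddr_generator.py | _template_severity_assessment
-- ===== SOURCE A (Python) =====
-- from typing import Dict, List, Any, Optional
--
-- def _template_severity_assessment(observations: List[Dict]) -> str:
--     """Template for Severity Assessment."""
--     if not observations:
--         return "Not Available - No severity data."
--
--     severity_breakdown = {}
--     for obs in observations:
--         severity = obs.get("severity", "Unknown")
--         severity_breakdown[severity] = severity_breakdown.get(severity, 0) + 1
--
--     content = "Severity Distribution:\n"
--     for severity in ["Critical", "High", "Medium", "Low"]:
--         if severity in severity_breakdown:
--             count = severity_breakdown[severity]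
--             content += f"• {severity}: {count} issue(s)\n"
--
--     content += "\nOverall Assessment: "
--     if severity_breakdown.get("Critical", 0) > 0:
--         content += "Property requires immediate professional attention for critical issues."
--     elif severity_breakdown.get("High", 0) > 0:
--         content += "Property requires prompt remediation of high-priority issues."
--     else:
--         content += "Property issues are manageable with appropriate maintenance planning."
--
--     return content
-- ===== SOURCE B (Python) =====
-- from typing import Dict, List, Any, Optional
--
-- _RANK = {"Critical": 0, "High": 1, "Medium": 2, "Low": 3}
-- _NAME = {0: "Critical", 1: "High", 2: "Medium", 3: "Low"}
--
-- def _runs(sevs):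
--     """Run-length encode an already-sorted list into (value, length) pairs."""
--     if not sevs:
--         return []
--     head, rest = sevs[0], sevs[1:]
--     k = 0
--     while k < len(rest) and rest[k] == head:
--         k += 1
--     return [(head, 1 + k)] + _runs(rest[k:])
--
-- def _template_severity_assessment(observations: List[Dict]) -> str:
--     """Template for Severity Assessment."""
--     if not observations:
--         return "Not Available - No severity data."
--     sevs = sorted(_RANK[s]
--                   for s in (o.get("severity", "Unknown") for o in observations)
--                   if s in _RANK)
--     lines = ["Severity Distribution:"]
--     for rank, count in _runs(sevs):
--         lines.append(f"• {_NAME[rank]}: {count} issue(s)")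
--     if sevs and sevs[0] == 0:
--         verdict = "Property requires immediate professional attention for critical issues."
--     elif sevs and sevs[0] == 1:
--         verdict = "Property requires prompt remediation of high-priority issues."
--     else:
--         verdict = "Property issues are manageable with appropriate maintenance planning."
--     return "\n".join(lines) + "\n\nOverall Assessment: " + verdict
-- ===== Notes on version B (the rewrite author's own statement) =====
-- stated objective: alternative
-- what changed: Replaces the hash-map tally with a sort-then-scan pipeline: severities are mapped to priority ranks, sorted, run-length encoded into the report lines, and the verdict is read off the minimum (first) rank.
import Mathlib
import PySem

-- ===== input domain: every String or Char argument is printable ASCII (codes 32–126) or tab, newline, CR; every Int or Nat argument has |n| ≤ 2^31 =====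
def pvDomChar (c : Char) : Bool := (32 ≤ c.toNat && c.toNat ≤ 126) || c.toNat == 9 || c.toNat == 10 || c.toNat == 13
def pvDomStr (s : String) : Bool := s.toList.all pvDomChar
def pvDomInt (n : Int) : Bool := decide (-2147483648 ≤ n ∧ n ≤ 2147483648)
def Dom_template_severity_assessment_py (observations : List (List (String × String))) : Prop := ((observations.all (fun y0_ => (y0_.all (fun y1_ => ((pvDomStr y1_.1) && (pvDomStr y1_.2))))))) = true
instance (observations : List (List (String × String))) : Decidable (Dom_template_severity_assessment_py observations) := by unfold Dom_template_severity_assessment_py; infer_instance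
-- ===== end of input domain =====

-- B replaces A's hash-map tally with a sort-then-scan pipeline: severities are mapped to
-- priority ranks, sorted, run-length encoded into the report lines, and the verdict is
-- read off the first (minimum) rank (objective: alternative; not claimed faster).

-- ===== PORT A =====
-- obs.get("severity", "Unknown"), shared by both Pythons
def pvGetSeverity (obs : List (String × String)) : String :=
  (PySem.Dict.mk obs).getD "severity" "Unknown"

def template_severity_assessment_py (observations : List (List (String × String))) : String :=
  if observations = [] then "Not Available - No severity data."
  else
    let severity_breakdown : PySem.Dict String Int :=
      observations.foldl (fun d obs =>
        let severity := pvGetSeverity obs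
        d.insert severity (d.getD severity 0 + 1)) PySem.Dict.empty
    let content := "Severity Distribution:\n"
    let content := ["Critical", "High", "Medium", "Low"].foldl (fun content severity =>
      if severity_breakdown.contains severity then
        content ++ "• " ++ severity ++ ": " ++
          PySem.Int.toStr (severity_breakdown.getD severity 0) ++ " issue(s)\n"
      else content) content
    let content := content ++ "\nOverall Assessment: "
    if severity_breakdown.getD "Critical" 0 > 0 then
      content ++ "Property requires immediate professional attention for critical issues."
    else if severity_breakdown.getD "High" 0 > 0 then
      content ++ "Property requires prompt remediation of high-priority issues."
    else
      content ++ "Property issues are manageable with appropriate maintenance planning."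

-- ===== PORT B =====
-- _RANK = {"Critical": 0, "High": 1, "Medium": 2, "Low": 3}
def pvRankDict : PySem.Dict String Int :=
  PySem.Dict.mk [("Critical", 0), ("High", 1), ("Medium", 2), ("Low", 3)]

-- _NAME = {0: "Critical", 1: "High", 2: "Medium", 3: "Low"}
def pvNameDict : PySem.Dict Int String :=
  PySem.Dict.mk [(0, "Critical"), (1, "High"), (2, "Medium"), (3, "Low")]

-- _runs: run-length encode an already-sorted list; the inner while scanning the
-- leading block of `rest` equal to `head` is takeWhile/dropWhile (exact: same split).
def pvRuns : List Int → List (Int × Nat)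
  | [] => []
  | h :: t =>
    (h, 1 + (t.takeWhile (· == h)).length) :: pvRuns (t.dropWhile (· == h))
termination_by l => l.length
decreasing_by
  simpa [Nat.lt_succ_iff] using List.length_dropWhile_le (· == h) t

def template_severity_assessment_py_alt (observations : List (List (String × String))) : String :=
  if observations = [] then "Not Available - No severity data."
  else
    -- sorted(_RANK[s] for s in (o.get("severity","Unknown") for o in observations) if s in _RANK)
    let sevs := PySem.List.sorted
      ((observations.map pvGetSeverity).filterMap (fun s => pvRankDict.get? s))
      (fun x => x) false
    let lines := (pvRuns sevs).foldl (fun lines rc =>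
      lines ++ ["• " ++ pvNameDict.getD rc.1 "" ++ ": " ++
        PySem.Int.toStr (rc.2 : Int) ++ " issue(s)"]) ["Severity Distribution:"]
    -- 'if sevs and sevs[0] == 0' is exactly 'sevs.head? == some 0'
    let verdict :=
      if sevs.head? == some 0 then
        "Property requires immediate professional attention for critical issues."
      else if sevs.head? == some 1 then
        "Property requires prompt remediation of high-priority issues."
      else
        "Property issues are manageable with appropriate maintenance planning."
    PySem.Str.join "\n" lines ++ "\n\nOverall Assessment: " ++ verdict

-- ===== PRECONDITION & SPEC =====
def Spec_template_severity_assessment_py (observations : List (List (String × String))) (out : String) : Prop := out = template_severity_assessment_py_alt observations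
instance (observations : List (List (String × String))) (out : String) : Decidable (Spec_template_severity_assessment_py observations out) := by unfold Spec_template_severity_assessment_py; infer_instance

-- ===== CLAIM (what is proved, stated in full; the proofs are below) =====
def Claim_equal_template_severity_assessment_py : Prop := ∀ (observations : List (List (String × String))), Dom_template_severity_assessment_py observations → Spec_template_severity_assessment_py observations (template_severity_assessment_py observations)

-- ===== LEMMAS AND PROOFS =====

-- the canonical sorted rank list with the four block sizes
def pvCanon (a b c d : Nat) : List Int :=
  List.replicate a 0 ++ (List.replicate b 1 ++ (List.replicate c 2 ++ List.replicate d 3))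

theorem pv_breakdown_eq (observations : List (List (String × String))) :
    observations.foldl (fun d obs =>
        let severity := pvGetSeverity obs
        d.insert severity (d.getD severity 0 + 1)) PySem.Dict.empty
      = PySem.Dict.counter (observations.map pvGetSeverity) := by
  rw [← PySem.Dict.foldl_insert_getD_add_one_eq_counter, List.foldl_map]

theorem pv_get_rank_none (s : String) (h1 : s ≠ "Critical") (h2 : s ≠ "High")
    (h3 : s ≠ "Medium") (h4 : s ≠ "Low") : pvRankDict.get? s = none := by
  have b1 : ("Critical" == s) = false := by simp [Ne.symm h1]
  have b2 : ("High" == s) = false := by simp [Ne.symm h2]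
  have b3 : ("Medium" == s) = false := by simp [Ne.symm h3]
  have b4 : ("Low" == s) = false := by simp [Ne.symm h4]
  simp [pvRankDict, PySem.Dict.get?_mk_cons, b1, b2, b3, b4, PySem.Dict.mk, PySem.Dict.get?]

theorem pv_ranks_perm (xs : List String) :
    (xs.filterMap (fun s => pvRankDict.get? s)).Perm
      (pvCanon (xs.count "Critical") (xs.count "High") (xs.count "Medium") (xs.count "Low")) := by
  induction xs with
  | nil => simp [pvCanon]
  | cons s t ih =>
    rcases eq_or_ne s "Critical" with h1 | h1
    · subst h1
      have hg : pvRankDict.get? "Critical" = some 0 := rfl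
      simpa [pvCanon, List.count_cons, List.filterMap_cons, hg, List.replicate_succ] using ih.cons 0
    · rcases eq_or_ne s "High" with h2 | h2
      · subst h2
        simp only [pvCanon, List.count_cons, List.filterMap_cons]
        norm_num [h1]
        exact (ih.cons 1).trans
          (by simpa [pvCanon, List.replicate_succ] using (List.perm_middle (a := (1:Int))
            (l₁ := List.replicate (t.count "Critical") 0)
            (l₂ := List.replicate (t.count "High") 1 ++ (List.replicate (t.count "Medium") 2 ++ List.replicate (t.count "Low") 3))).symm)
      · rcases eq_or_ne s "Medium" with h3 | h3
        · subst h3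
          simp only [pvCanon, List.count_cons, List.filterMap_cons]
          norm_num [h1, h2]
          refine (ih.cons 2).trans ?_
          have inner := (List.perm_middle (a := (2:Int))
            (l₁ := List.replicate (t.count "High") 1)
            (l₂ := List.replicate (t.count "Medium") 2 ++ List.replicate (t.count "Low") 3)).symm
          have outer := (List.perm_middle (a := (2:Int))
            (l₁ := List.replicate (t.count "Critical") 0)
            (l₂ := List.replicate (t.count "High") 1 ++ (List.replicate (t.count "Medium") 2 ++ List.replicate (t.count "Low") 3))).symm
          refine outer.trans ?_
          simpa [pvCanon, List.replicate_succ] using inner.append_left (List.replicate (t.count "Critical") 0)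
        · rcases eq_or_ne s "Low" with h4 | h4
          · subst h4
            simp only [pvCanon, List.count_cons, List.filterMap_cons]
            norm_num [h1, h2, h3]
            refine (ih.cons 3).trans ?_
            have p1 := (List.perm_middle (a := (3:Int))
              (l₁ := List.replicate (t.count "Medium") 2)
              (l₂ := List.replicate (t.count "Low") 3)).symm
            have p2 := (List.perm_middle (a := (3:Int))
              (l₁ := List.replicate (t.count "High") 1)
              (l₂ := List.replicate (t.count "Medium") 2 ++ List.replicate (t.count "Low") 3)).symm
            have p3 := (List.perm_middle (a := (3:Int))
              (l₁ := List.replicate (t.count "Critical") 0)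
              (l₂ := List.replicate (t.count "High") 1 ++ (List.replicate (t.count "Medium") 2 ++ List.replicate (t.count "Low") 3))).symm
            refine p3.trans ?_
            refine ((p2.append_left (List.replicate (t.count "Critical") 0)).trans ?_)
            simpa [pvCanon, List.replicate_succ] using
              (p1.append_left (List.replicate (t.count "High") 1)).append_left (List.replicate (t.count "Critical") 0)
          · simp [List.filterMap_cons, pv_get_rank_none s h1 h2 h3 h4, List.count_cons,
              h1, h2, h3, h4, ih]

theorem pv_canon_sorted (a b c d : Nat) : (pvCanon a b c d).Pairwise (· ≤ ·) := by
  simp only [pvCanon, List.pairwise_append, List.mem_append, List.mem_replicate]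
  refine ⟨List.pairwise_replicate.2 (by norm_num), ⟨List.pairwise_replicate.2 (by norm_num),
    ⟨List.pairwise_replicate.2 (by norm_num), List.pairwise_replicate.2 (by norm_num), ?_⟩, ?_⟩, ?_⟩ <;>
    rintro x hx y hy <;> omega

theorem pv_sorted_eq_canon (xs : List String) :
    PySem.List.sorted (xs.filterMap (fun s => pvRankDict.get? s)) (fun x => x) false
      = pvCanon (xs.count "Critical") (xs.count "High") (xs.count "Medium") (xs.count "Low") := by
  refine List.Perm.eq_of_pairwise' ?_ (pv_canon_sorted _ _ _ _)
    ((PySem.List.sorted_perm _ _ _).trans (pv_ranks_perm xs))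
  simpa using PySem.List.sorted_pairwise (xs.filterMap (fun s => pvRankDict.get? s)) (fun x => x)

theorem pv_runs_append_block (v : Int) (n : Nat) (rest : List Int)
    (h : ∀ x ∈ rest, (x == v) = false) :
    pvRuns (List.replicate n v ++ rest)
      = (if 0 < n then [(v, n)] else []) ++ pvRuns rest := by
  have htw : rest.takeWhile (· == v) = [] := by
    cases rest with
    | nil => rfl
    | cons r rs => simp [List.takeWhile, h r (by simp)]
  have hdw : rest.dropWhile (· == v) = rest := by
    cases rest with
    | nil => rfl
    | cons r rs => simp [List.dropWhile, h r (by simp)]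
  cases n with
  | zero => simp
  | succ m =>
    have tw : ∀ m : Nat, (List.replicate m v ++ rest).takeWhile (· == v) = List.replicate m v := by
      intro m; induction m with
      | zero => simpa using htw
      | succ k ihk => simp [List.replicate_succ, List.takeWhile, ihk]
    have dw : ∀ m : Nat, (List.replicate m v ++ rest).dropWhile (· == v) = rest := by
      intro m; induction m with
      | zero => simpa using hdw
      | succ k ihk => simp [List.replicate_succ, List.dropWhile, ihk]
    rw [List.replicate_succ, List.cons_append, pvRuns, tw m, dw m]
    simp [Nat.add_comm]

theorem pv_runs_canon (a b c d : Nat) :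
    pvRuns (pvCanon a b c d)
      = (if 0 < a then [((0:Int), a)] else []) ++ ((if 0 < b then [((1:Int), b)] else [])
        ++ ((if 0 < c then [((2:Int), c)] else []) ++ (if 0 < d then [((3:Int), d)] else []))) := by
  rw [pvCanon,
    pv_runs_append_block 0 a _ (by intro x hx; simp [List.mem_replicate] at hx ⊢; omega),
    pv_runs_append_block 1 b _ (by intro x hx; simp [List.mem_replicate] at hx ⊢; omega),
    pv_runs_append_block 2 c _ (by intro x hx; simp [List.mem_replicate] at hx ⊢; omega),
    ← List.append_nil (List.replicate d 3),
    pv_runs_append_block 3 d _ (by simp)]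
  simp [pvRuns]

theorem pv_canon_head (a b c d : Nat) :
    (pvCanon a b c d).head? = if 0 < a then some 0 else if 0 < b then some 1
      else if 0 < c then some 2 else if 0 < d then some 3 else none := by
  cases a with
  | succ a => simp [pvCanon, List.replicate_succ]
  | zero =>
    cases b with
    | succ b => simp [pvCanon, List.replicate_succ]
    | zero =>
      cases c with
      | succ c => simp [pvCanon, List.replicate_succ]
      | zero =>
        cases d with
        | succ d => simp [pvCanon, List.replicate_succ]
        | zero => simp [pvCanon]

-- ===== VERDICT (by name: the statement is the Claim_ definition above) =====
theorem template_severity_assessment_py_spec : Claim_equal_template_severity_assessment_py := by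
  intro observations _
  unfold Spec_template_severity_assessment_py
  unfold template_severity_assessment_py template_severity_assessment_py_alt
  by_cases h : observations = []
  · simp [h]
  · simp only [h, if_false]
    rw [pv_breakdown_eq, pv_sorted_eq_canon, pv_runs_canon, pv_canon_head]
    set xs := observations.map pvGetSeverity with hxs
    have hc : ∀ sev, (PySem.Dict.counter xs).contains sev = xs.contains sev :=
      fun sev => PySem.Dict.contains_counter xs sev
    have hg : ∀ sev, (PySem.Dict.counter xs).getD sev 0 = (xs.count sev : Int) :=
      fun sev => PySem.Dict.getD_counter xs sev
    have e1 : ∀ sev : String, (xs.contains sev = true) ↔ 0 < xs.count sev := by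
      intro sev; rw [List.contains_iff_mem, List.count_pos_iff]
    simp only [hc, hg, e1, gt_iff_lt, Int.natCast_pos, List.foldl, ← hxs]
    rcases Nat.eq_zero_or_pos (xs.count "Critical") with hC | hC <;>
    rcases Nat.eq_zero_or_pos (xs.count "High") with hH | hH <;>
    rcases Nat.eq_zero_or_pos (xs.count "Medium") with hM | hM <;>
    rcases Nat.eq_zero_or_pos (xs.count "Low") with hL | hL <;>
      simp only [hC, hH, hM, hL, if_pos, not_lt_zero', ite_false, ite_true, lt_irrefl,
        List.nil_append, List.append_nil, List.cons_append, List.foldl] <;>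
      simp [pvNameDict, PySem.Dict.getD] <;>
      apply String.ext <;>
      simp [PySem.Str.toList_join, PySem.Chars.join, String.toList_append,
        List.intercalate, PySem.Dict.get?, PySem.Dict.getD, List.find?]
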